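-- pv_equiv track=rewrite | github.com/dariapavlova02/hybrid-sanctions-search-engine | src/ai_service/layers/normalization/processors/normalization_factory.py | _title_case_with_punctuation
-- ===== SOURCE A (Python) =====
-- def _title_case_with_punctuation(token: str) -> str:
--     """Apply title case while preserving punctuation."""
--     if not token:
--         return token
--
--     # Split by common punctuation but preserve it
--     parts = []
--     current = ""
--
--     for char in token:
--         if char in ["'", "-", "."]:
--             if current:
--                 parts.append(current.title())
--                 current = ""
--             parts.append(char)
--         else:
--             current += char
--
--     if current:
--         parts.append(current.title())
--
--     return "".join(parts)
-- ===== SOURCE B (Python) =====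
-- import re
--
--
-- def _title_case_with_punctuation(token: str) -> str:
--     """Apply title case while preserving punctuation."""
--     parts = re.split(r"(['.\-])", token)
--     return "".join(p.title() for p in parts)
-- ===== Notes on version B (the rewrite author's own statement) =====
-- stated objective: idiomatic
-- what changed: Replaces the char-by-char scan with an explicit parts/current accumulator by a regex split on a capturing delimiter group followed by title-casing each piece and joining.
import Mathlib
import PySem

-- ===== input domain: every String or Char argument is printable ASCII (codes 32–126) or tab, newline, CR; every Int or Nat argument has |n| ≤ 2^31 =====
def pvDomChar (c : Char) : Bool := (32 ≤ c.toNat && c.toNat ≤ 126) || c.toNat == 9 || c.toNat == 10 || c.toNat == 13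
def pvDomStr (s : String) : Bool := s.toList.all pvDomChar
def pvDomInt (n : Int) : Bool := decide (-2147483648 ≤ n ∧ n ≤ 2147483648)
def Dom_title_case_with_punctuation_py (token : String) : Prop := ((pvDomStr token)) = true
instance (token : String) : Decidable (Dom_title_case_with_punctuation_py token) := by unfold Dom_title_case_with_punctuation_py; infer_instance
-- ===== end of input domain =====

-- B replaces A's char-scan-with-accumulator by a split-on-kept-delimiters then title-each-piece-and-join decomposition (idiomatic; same cost).

-- Shared port of the builtin str.title(): exact on the ASCII domain, where the
-- cased characters are exactly the ASCII letters (prev = "previous char was cased").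
def pvTitle : List Char → Bool → List Char
  | [], _ => []
  | c :: cs, prev =>
    (if c.isAlpha then (if prev then c.toLower else c.toUpper) else c) :: pvTitle cs c.isAlpha

def pvIsDelim (c : Char) : Bool := c == '\'' || c == '-' || c == '.'

-- ===== PORT A =====
-- the loop over `token` with `parts` (list of finished pieces) and `current` (accumulator)
def goA : List Char → List (List Char) → List Char → List (List Char)
  | [], parts, current =>
      if current.isEmpty then parts else parts ++ [pvTitle current false]
  | c :: rest, parts, current =>
      if pvIsDelim c then
        goA rest ((if current.isEmpty then parts else parts ++ [pvTitle current false]) ++ [[c]]) []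
      else
        goA rest parts (current ++ [c])

def title_case_with_punctuation_py (token : String) : String :=
  if token.toList.isEmpty then token
  else String.ofList (goA token.toList [] []).flatten

-- ===== PORT B =====
-- port of re.split(r"(['.\-])", token): pieces between delimiters, each delimiter kept as its own part
def splitKeep : List Char → List Char → List (List Char)
  | [], cur => [cur.reverse]
  | c :: rest, cur =>
      if pvIsDelim c then cur.reverse :: [c] :: splitKeep rest []
      else splitKeep rest (c :: cur)

def title_case_with_punctuation_py_alt (token : String) : String :=
  String.ofList (((splitKeep token.toList []).map (fun p => pvTitle p false)).flatten)

-- ===== PRECONDITION & SPEC =====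
def Spec_title_case_with_punctuation_py (token : String) (out : String) : Prop := out = title_case_with_punctuation_py_alt token
instance (token : String) (out : String) : Decidable (Spec_title_case_with_punctuation_py token out) := by unfold Spec_title_case_with_punctuation_py; infer_instance

-- ===== CLAIM (what is proved, stated in full; the proofs are below) =====
def Claim_equal_title_case_with_punctuation_py : Prop := ∀ (token : String), Dom_title_case_with_punctuation_py token → Spec_title_case_with_punctuation_py token (title_case_with_punctuation_py token)

-- ===== LEMMAS AND PROOFS =====

-- the "previous char was cased" state after processing xs starting from p
def stateAfter (xs : List Char) (p : Bool) : Bool := xs.foldl (fun _ c => c.isAlpha) p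

theorem pvTitle_append (xs ys : List Char) (p : Bool) :
    pvTitle (xs ++ ys) p = pvTitle xs p ++ pvTitle ys (stateAfter xs p) := by
  induction xs generalizing p with
  | nil => simp [pvTitle, stateAfter]
  | cons c cs ih => simp [pvTitle, stateAfter, ih, List.foldl]

theorem delim_not_alpha (c : Char) (h : pvIsDelim c = true) : c.isAlpha = false := by
  unfold pvIsDelim at h
  simp only [Bool.or_eq_true, beq_iff_eq] at h
  rcases h with (h | h) | h <;> subst h <;> decide

theorem pvTitle_delim_cons (c : Char) (cs : List Char) (p : Bool) (h : pvIsDelim c = true) :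
    pvTitle (c :: cs) p = c :: pvTitle cs false := by
  simp [pvTitle, delim_not_alpha c h]

theorem goA_spec (cs : List Char) (parts : List (List Char)) (cur : List Char) :
    (goA cs parts cur).flatten = parts.flatten ++ pvTitle (cur ++ cs) false := by
  induction cs generalizing parts cur with
  | nil =>
    by_cases h : cur.isEmpty
    · simp [goA, List.isEmpty_iff.mp h, pvTitle]
    · simp [goA, h]
  | cons c rest ih =>
    by_cases hd : pvIsDelim c
    · by_cases h : cur.isEmpty
      · have hc : cur = [] := List.isEmpty_iff.mp h
        simp [goA, hd, hc, ih, pvTitle_delim_cons c rest false hd]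
      · simp [goA, hd, h, ih, pvTitle_append, pvTitle, delim_not_alpha c hd]
    · simp [goA, hd, ih]

theorem splitKeep_spec (cs : List Char) (cur : List Char) :
    ((splitKeep cs cur).map (fun p => pvTitle p false)).flatten
      = pvTitle (cur.reverse ++ cs) false := by
  induction cs generalizing cur with
  | nil => simp [splitKeep]
  | cons c rest ih =>
    by_cases hd : pvIsDelim c
    · simp [splitKeep, hd, ih, pvTitle_append, pvTitle, delim_not_alpha c hd]
    · rw [show cur.reverse ++ (c :: rest) = (c :: cur).reverse ++ rest by simp]
      simp [splitKeep, hd, ih]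

-- ===== VERDICT (by name: the statement is the Claim_ definition above) =====
theorem title_case_with_punctuation_py_spec : Claim_equal_title_case_with_punctuation_py := by
  intro token _
  unfold Spec_title_case_with_punctuation_py title_case_with_punctuation_py title_case_with_punctuation_py_alt
  by_cases h : token.toList.isEmpty
  · have hc : token.toList = [] := List.isEmpty_iff.mp h
    have ht : token = "" := by
      have := congrArg String.ofList hc
      simpa using this
    simp [ht, splitKeep, pvTitle]
  · rw [if_neg h, goA_spec, splitKeep_spec]
    simp
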